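-- pv_equiv track=rewrite | github.com/gunchul/weather_php | swell.py | merge
-- ===== SOURCE A (Python) =====
-- def merge(heights, periods):
--     swells = []
--     for height in heights:
--         for period in periods:
--             if height[0] == period[0]:
--                 height.append(period[1])
--                 swells.append(height)
--     return swells
-- ===== SOURCE B (Python) =====
-- # B: index the period rows once by first field, then emit each height's merged row
-- # in one lookup, instead of A's inner scan of all periods for every height.
-- # Like A, mutates matched height rows in place; empty input short-circuits.
-- def merge(heights, periods):
--     if not heights or not periods:
--         return []
--     index = {}
--     for p in periods:
--         index.setdefault(p[0], []).append(p)
--     swells = []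
--     for h in heights:
--         vals = [p[1] for p in index.get(h[0], [])]
--         h.extend(vals)
--         swells.extend([h] * len(vals))
--     return swells
-- ===== Notes on version B (the rewrite author's own statement) =====
-- stated objective: alternative
-- what changed: B builds a dict of period rows keyed by first field once and emits each height's merged row with a single lookup (one replicate of the final row), replacing A's inner scan of all periods per height with its element-by-element append; on the duplicate-heavy timing inputs the output size dominates, so no measured speed-up is claimed.
import Mathlib
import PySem

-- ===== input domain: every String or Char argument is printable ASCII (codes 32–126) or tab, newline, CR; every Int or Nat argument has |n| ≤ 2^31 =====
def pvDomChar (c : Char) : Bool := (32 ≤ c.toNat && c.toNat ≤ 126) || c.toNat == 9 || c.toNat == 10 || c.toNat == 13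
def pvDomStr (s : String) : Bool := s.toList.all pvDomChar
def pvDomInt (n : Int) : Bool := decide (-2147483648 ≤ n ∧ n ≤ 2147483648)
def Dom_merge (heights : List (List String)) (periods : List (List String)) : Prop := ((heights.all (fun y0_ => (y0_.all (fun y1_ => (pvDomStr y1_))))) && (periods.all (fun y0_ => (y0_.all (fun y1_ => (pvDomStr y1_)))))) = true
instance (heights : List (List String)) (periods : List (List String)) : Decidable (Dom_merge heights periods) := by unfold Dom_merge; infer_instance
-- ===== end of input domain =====

-- B indexes the period rows by their first field once and emits each height's merged row
-- with a single lookup, instead of A's inner scan of all periods per height. Equivalence is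
-- about the RETURN value; both A and B also mutate the matched height rows in place.
-- Python aliasing note (both ports): 'swells.append(height)' / '[h] * len(vals)' append
-- references to the list object that keeps being mutated, so each of the k appended entries'
-- final value is the height row extended by ALL k matching period values; the ports model
-- this by replicating the final row k times.

-- ===== PORT A =====
def merge (heights : List (List String)) (periods : List (List String)) : List (List String) :=
  heights.foldl (fun swells h =>
    -- inner loop: for period in periods: if height[0] == period[0]: height.append(period[1]); swells.append(height)
    let r := periods.foldl (fun (st : List String × Nat) p =>
      if PySem.List.pyGet? h 0 == PySem.List.pyGet? p 0 then
        (st.1 ++ [(PySem.List.pyGet? p 1).getD ""], st.2 + 1)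
      else st) (h, 0)
    swells ++ List.replicate r.2 r.1) []

-- ===== PORT B =====
def merge_alt (heights : List (List String)) (periods : List (List String)) : List (List String) :=
  -- if not heights or not periods: return []
  if heights.isEmpty || periods.isEmpty then []
  else
    -- index = {}; for p in periods: index.setdefault(p[0], []).append(p)
    let index : PySem.Dict (Option String) (List (List String)) :=
      periods.foldl (fun d p => d.modify (PySem.List.pyGet? p 0) [] (· ++ [p])) PySem.Dict.empty
    -- for h in heights: vals = [p[1] for p in index.get(h[0], [])]; h.extend(vals); swells.extend([h] * len(vals))
    heights.flatMap (fun h =>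
      let vals := (index.getD (PySem.List.pyGet? h 0) []).map (fun p => (PySem.List.pyGet? p 1).getD "")
      List.replicate vals.length (h ++ vals))

-- ===== PRECONDITION & SPEC =====
-- Pre_ excludes exactly the inputs on which A raises IndexError: with both lists nonempty,
-- an empty height row, an empty period row, or a matching period row with no second field.
def Pre_merge (heights : List (List String)) (periods : List (List String)) : Prop :=
  heights = [] ∨ periods = [] ∨
  ((∀ h ∈ heights, h ≠ []) ∧ (∀ p ∈ periods, p ≠ []) ∧
   (∀ p ∈ periods, (∃ h ∈ heights, h.head? = p.head?) → 2 ≤ p.length))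
instance (heights : List (List String)) (periods : List (List String)) : Decidable (Pre_merge heights periods) := by unfold Pre_merge; infer_instance

def pvWitness_merge : List (List String) × List (List String) :=
  ([["a", "1"], ["b", "3"]], [["a", "x"], ["c", "y"], ["a", "z"]])

def Spec_merge (heights : List (List String)) (periods : List (List String)) (out : List (List String)) : Prop := out = merge_alt heights periods
instance (heights : List (List String)) (periods : List (List String)) (out : List (List String)) : Decidable (Spec_merge heights periods out) := by unfold Spec_merge; infer_instance

-- ===== CLAIM (what is proved, stated in full; the proofs are below) =====
def Claim_equal_merge : Prop := ∀ (heights : List (List String)) (periods : List (List String)), Dom_merge heights periods → Pre_merge heights periods → Spec_merge heights periods (merge heights periods)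

-- ===== LEMMAS AND PROOFS =====

-- A's guarded inner fold, closed form: the filtered periods' second fields get appended
-- one by one and counted.
lemma fold_acc (l : List (List String)) (acc : List String) (n : Nat) :
    l.foldl (fun (st : List String × Nat) p =>
        (st.1 ++ [(PySem.List.pyGet? p 1).getD ""], st.2 + 1)) (acc, n)
      = (acc ++ l.map (fun p => (PySem.List.pyGet? p 1).getD ""), n + l.length) := by
  induction l generalizing acc n with
  | nil => simp
  | cons p t ih => simp [List.foldl_cons, ih]; omega

lemma inner_closed (h : List String) (periods : List (List String)) :
    periods.foldl (fun (st : List String × Nat) p =>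
        if PySem.List.pyGet? h 0 == PySem.List.pyGet? p 0 then
          (st.1 ++ [(PySem.List.pyGet? p 1).getD ""], st.2 + 1)
        else st) (h, 0)
      = (h ++ (periods.filter (fun p => PySem.List.pyGet? p 0 == PySem.List.pyGet? h 0)).map
            (fun p => (PySem.List.pyGet? p 1).getD ""),
         (periods.filter (fun p => PySem.List.pyGet? p 0 == PySem.List.pyGet? h 0)).length) := by
  have e : ∀ st : List String × Nat, ∀ p : List String,
      (if PySem.List.pyGet? h 0 == PySem.List.pyGet? p 0 then
        (st.1 ++ [(PySem.List.pyGet? p 1).getD ""], st.2 + 1) else st)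
      = (if PySem.List.pyGet? p 0 == PySem.List.pyGet? h 0 then
        (st.1 ++ [(PySem.List.pyGet? p 1).getD ""], st.2 + 1) else st) := by
    intro st p; rw [BEq.comm]
  simp only [e]
  rw [PySem.List.foldl_if_eq_foldl_filter, fold_acc]
  simp

-- B's bucket for key c holds exactly the period rows whose first field is c, in order.
lemma bucket_eq (periods : List (List String)) (c : Option String) :
    (periods.foldl (fun d p => d.modify (PySem.List.pyGet? p 0) [] (· ++ [p]))
        (PySem.Dict.empty : PySem.Dict (Option String) (List (List String)))).getD c []
      = periods.filter (fun p => PySem.List.pyGet? p 0 == c) := by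
  have h := PySem.Dict.getD_foldl_modify_append
      (l := periods.map (fun p => (PySem.List.pyGet? p 0, p)))
      (d := (PySem.Dict.empty : PySem.Dict (Option String) (List (List String)))) (c := c)
  simpa [List.foldl_map, List.filter_map, Function.comp_def] using h

-- ===== VERDICT (by name: the statement is the Claim_ definition above) =====
theorem merge_spec : Claim_equal_merge := by
  intro heights periods _ _
  unfold Spec_merge merge merge_alt
  simp only [inner_closed]
  rw [PySem.List.foldl_append_eq_flatMap]
  by_cases hp : periods = []
  · subst hp; simp
  by_cases hh : heights = []
  · subst hh; simp
  rw [if_neg (by simp [hh, hp])]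
  simp only [List.nil_append]
  refine List.flatMap_congr (fun h _ => ?_)
  rw [bucket_eq]
  simp
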